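-- pv_equiv track=rewrite | github.com/abushka110/MOOC.fi-solutions | introductionToProgramming/Part5/1-More-Lists/7-Sudoku-Check-Grid.py | sudoku_row_correct
-- ===== SOURCE A (Python) =====
-- def sudoku_row_correct(sudoku: list):
--     for row_no in range(0, 7):
--         numbers = []
--         for element in sudoku[row_no]:
--             if element > 0 and element in numbers:
--                 return False
--             numbers.append(element)
--     return True
-- ===== SOURCE B (Python) =====
-- def sudoku_row_correct(sudoku: list):
--     for row_no in range(0, 7):
--         nz = sorted(e for e in sudoku[row_no] if e > 0)
--         for a, b in zip(nz, nz[1:]):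
--             if a == b:
--                 return False
--     return True
-- ===== Notes on version B (the rewrite author's own statement) =====
-- stated objective: alternative
-- what changed: Sort-then-scan: each row's positive entries are filtered and sorted, and a duplicate is detected by scanning adjacent pairs of the sorted list for equality, instead of A's incremental membership scan against an accumulator list.
import Mathlib
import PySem

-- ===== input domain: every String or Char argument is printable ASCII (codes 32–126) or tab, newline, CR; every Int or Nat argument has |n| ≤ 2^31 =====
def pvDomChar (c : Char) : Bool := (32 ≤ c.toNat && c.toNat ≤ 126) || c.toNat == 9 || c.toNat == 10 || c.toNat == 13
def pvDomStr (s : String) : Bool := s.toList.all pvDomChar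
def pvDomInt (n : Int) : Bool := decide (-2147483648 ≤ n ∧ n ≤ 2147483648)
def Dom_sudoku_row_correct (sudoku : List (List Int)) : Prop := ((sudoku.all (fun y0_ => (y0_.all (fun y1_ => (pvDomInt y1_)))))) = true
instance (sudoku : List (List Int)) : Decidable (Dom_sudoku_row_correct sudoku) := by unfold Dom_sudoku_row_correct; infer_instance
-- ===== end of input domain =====

-- B sorts each row's positive entries and scans adjacent pairs for a duplicate (sort-then-scan); return value equivalence only.

-- ===== PORT A =====
-- inner 'for element in sudoku[row_no]' loop with the 'numbers' accumulator; False = early return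
def pyAinner (numbers : List Int) : List Int → Bool
  | [] => true
  | e :: rest =>
    if 0 < e && numbers.contains e then false
    else pyAinner (numbers ++ [e]) rest

-- outer 'for row_no in range(0, 7)' loop; sudoku[row_no] via pyGet? (total under Pre_)
def pyAloop (sudoku : List (List Int)) : List Int → Bool
  | [] => true
  | r :: rs =>
    if pyAinner [] ((PySem.List.pyGet? sudoku r).getD []) then pyAloop sudoku rs
    else false

def sudoku_row_correct (sudoku : List (List Int)) : Bool :=
  pyAloop sudoku (PySem.List.pyRange 0 7 1)

-- ===== PORT B =====
-- 'for a, b in zip(nz, nz[1:]): if a == b: return False' — any adjacent pair equal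
def pyBadj (nz : List Int) : Bool :=
  (nz.zip nz.tail).any (fun p => p.1 == p.2)

-- 'for row_no in range(0, 7)' with nz = sorted positives of sudoku[row_no]
def pyBloop (sudoku : List (List Int)) : List Int → Bool
  | [] => true
  | r :: rs =>
    let nz := PySem.List.sorted (((PySem.List.pyGet? sudoku r).getD []).filter (fun e => decide (0 < e))) (fun x => x) false
    if pyBadj nz then false else pyBloop sudoku rs

def sudoku_row_correct_alt (sudoku : List (List Int)) : Bool :=
  pyBloop sudoku (PySem.List.pyRange 0 7 1)

-- ===== PRECONDITION & SPEC =====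
-- Exactly where both Pythons return: either the 7 rows that range(0,7) indexes exist, or
-- some (existing) row has a duplicate positive entry, which triggers the early False before
-- the missing index is reached; otherwise both raise IndexError.
def Pre_sudoku_row_correct (sudoku : List (List Int)) : Prop :=
  7 ≤ sudoku.length ∨ ∃ r ∈ sudoku, ¬ (r.filter (fun e => decide (0 < e))).Nodup
instance (sudoku : List (List Int)) : Decidable (Pre_sudoku_row_correct sudoku) := by unfold Pre_sudoku_row_correct; infer_instance

def pvWitness_sudoku_row_correct : List (List Int) := [[1,2,3],[0,0],[4],[],[5,0,5],[],[9]]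

def Spec_sudoku_row_correct (sudoku : List (List Int)) (out : Bool) : Prop := out = sudoku_row_correct_alt sudoku
instance (sudoku : List (List Int)) (out : Bool) : Decidable (Spec_sudoku_row_correct sudoku out) := by unfold Spec_sudoku_row_correct; infer_instance

-- ===== CLAIM (what is proved, stated in full; the proofs are below) =====
def Claim_equal_sudoku_row_correct : Prop := ∀ (sudoku : List (List Int)), Dom_sudoku_row_correct sudoku → Pre_sudoku_row_correct sudoku → Spec_sudoku_row_correct sudoku (sudoku_row_correct sudoku)

-- ===== LEMMAS AND PROOFS =====

-- A's inner scan with accumulator ns answers: is the positive part of ns ++ xs duplicate-free?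
theorem pyAinner_eq_nodup (xs : List Int) : ∀ (ns : List Int),
    (ns.filter (fun e => decide (0 < e))).Nodup →
    pyAinner ns xs = decide (((ns ++ xs).filter (fun e => decide (0 < e))).Nodup) := by
  induction xs with
  | nil => intro ns h; simp [pyAinner, h]
  | cons x xs ih =>
    intro ns h
    by_cases hx : 0 < x
    · by_cases hmem : x ∈ ns
      · have hnd : ¬ ((ns.filter (fun e => decide (0 < e))) ++
            x :: (xs.filter (fun e => decide (0 < e)))).Nodup := by
          intro hn
          have hd := List.disjoint_of_nodup_append hn
          exact hd (List.mem_filter.mpr ⟨hmem, by simpa using hx⟩) (by simp)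
        simp [pyAinner, hx, hmem, hnd]
      · have hns : ((ns ++ [x]).filter (fun e => decide (0 < e))).Nodup := by
          rw [List.filter_append]
          simp only [List.filter_cons, List.filter_nil]
          rw [if_pos (by simpa using hx)]
          refine List.Nodup.append h (by simp) ?_
          intro a ha hb
          simp at hb
          subst hb
          exact hmem (List.mem_of_mem_filter ha)
        have := ih (ns ++ [x]) hns
        simpa [pyAinner, hx, hmem, List.append_assoc] using this
    · have := ih (ns ++ [x]) (by
        rw [List.filter_append]
        simp only [List.filter_cons, List.filter_nil]
        rw [if_neg (by simpa using hx)]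
        simpa using h)
      simpa [pyAinner, hx, List.append_assoc] using this

-- on a ≤-sorted list, an equal adjacent pair exists iff the list has a duplicate
theorem adj_eq_not_nodup : ∀ (l : List Int), l.Pairwise (· ≤ ·) →
    pyBadj l = !decide l.Nodup := by
  intro l
  induction l with
  | nil => intro _; simp [pyBadj]
  | cons a t ih =>
    cases t with
    | nil => intro _; simp [pyBadj]
    | cons b r =>
      intro hp
      have hab : a ≤ b := (List.pairwise_cons.mp hp).1 b (by simp)
      have hpt : (b :: r).Pairwise (· ≤ ·) := (List.pairwise_cons.mp hp).2
      by_cases he : a = b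
      · subst he
        simp [pyBadj]
      · have hlt : a < b := lt_of_le_of_ne hab he
        have hnot : a ∉ b :: r := by
          intro hm
          rcases List.mem_cons.mp hm with h1 | h2
          · exact he h1
          · have hbx : b ≤ a := (List.pairwise_cons.mp hpt).1 a h2
            exact absurd (lt_of_lt_of_le hlt hbx) (lt_irrefl a)
        have this' : (((b :: r).zip r).any fun p => p.1 == p.2) = !decide (b :: r).Nodup := by
          simpa [pyBadj] using ih hpt
        simp [pyBadj, he, hnot, this', List.nodup_cons]

-- the two per-row checks agree: A's scan succeeds iff B finds no adjacent duplicate in the sorted positives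
theorem row_eq (row : List Int) :
    pyAinner [] row =
      !pyBadj (PySem.List.sorted (row.filter (fun e => decide (0 < e))) (fun x => x) false) := by
  have hs : (PySem.List.sorted (row.filter (fun e => decide (0 < e))) (fun x => x) false).Pairwise (· ≤ ·) := by
    simpa using PySem.List.sorted_pairwise (xs := row.filter (fun e => decide (0 < e))) (key := fun x => x)
  rw [adj_eq_not_nodup _ hs]
  have hperm := PySem.List.sorted_perm (xs := row.filter (fun e => decide (0 < e)))
    (key := fun x => x) (rev := false)
  have hnd : (PySem.List.sorted (row.filter (fun e => decide (0 < e))) (fun x => x) false).Nodup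
      ↔ (row.filter (fun e => decide (0 < e))).Nodup := hperm.nodup_iff
  rw [show (!!decide (PySem.List.sorted (row.filter (fun e => decide (0 < e))) (fun x => x) false).Nodup)
      = decide (PySem.List.sorted (row.filter (fun e => decide (0 < e))) (fun x => x) false).Nodup from Bool.not_not _]
  rw [decide_eq_decide.mpr hnd]
  simpa using pyAinner_eq_nodup row [] (by simp)

-- both outer loops agree pointwise over any index list
theorem loops_eq (sudoku : List (List Int)) : ∀ l : List Int,
    pyAloop sudoku l = pyBloop sudoku l := by
  intro l
  induction l with
  | nil => rfl
  | cons r rs ih =>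
    have h := row_eq ((PySem.List.pyGet? sudoku r).getD [])
    by_cases hb : pyBadj (PySem.List.sorted
        (((PySem.List.pyGet? sudoku r).getD []).filter (fun e => decide (0 < e))) (fun x => x) false)
    · simp [pyAloop, pyBloop, h, hb]
    · simp [pyAloop, pyBloop, h, hb, ih]

-- ===== VERDICT (by name: the statement is the Claim_ definition above) =====
theorem sudoku_row_correct_spec : Claim_equal_sudoku_row_correct := by
  intro sudoku _ _
  show sudoku_row_correct sudoku = sudoku_row_correct_alt sudoku
  rw [sudoku_row_correct, sudoku_row_correct_alt, loops_eq]
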